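-- pv_equiv track=rewrite | github.com/d8ahazard/overmind | app/providers/model_filters.py | _pick_by_priority
-- ===== SOURCE A (Python) =====
-- from typing import Iterable, List
--
-- def _pick_by_priority(models: Iterable[str], priority: List[str]) -> str | None:
--     items = [item for item in models if item]
--     if not items:
--         return None
--     for tag in priority:
--         match = next((m for m in items if tag in m.lower()), None)
--         if match:
--             return match
--     return items[0]
-- ===== SOURCE B (Python) =====
-- def _pick_by_priority(models, priority):
--     best = None  # (rank, item) with minimal rank; earlier items win ties
--     for item in models:
--         if not item:
--             continue
--         low = item.lower()
--         rank = next((i for i, tag in enumerate(priority) if tag in low), len(priority))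
--         if best is None or rank < best[0]:
--             best = (rank, item)
--     return best[1] if best is not None else None
-- ===== Notes on version B (the rewrite author's own statement) =====
-- stated objective: alternative
-- what changed: Tag-major search (for each priority tag, rescan all items for the first substring match, falling back to items[0]) is replaced by a single item-major pass that lowercases each item once, computes its rank (index of first matching tag, len(priority) if none) and keeps the running best item under strictly smaller rank, so earlier items win ties and items[0] falls out naturally when nothing matches.
import Mathlib
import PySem

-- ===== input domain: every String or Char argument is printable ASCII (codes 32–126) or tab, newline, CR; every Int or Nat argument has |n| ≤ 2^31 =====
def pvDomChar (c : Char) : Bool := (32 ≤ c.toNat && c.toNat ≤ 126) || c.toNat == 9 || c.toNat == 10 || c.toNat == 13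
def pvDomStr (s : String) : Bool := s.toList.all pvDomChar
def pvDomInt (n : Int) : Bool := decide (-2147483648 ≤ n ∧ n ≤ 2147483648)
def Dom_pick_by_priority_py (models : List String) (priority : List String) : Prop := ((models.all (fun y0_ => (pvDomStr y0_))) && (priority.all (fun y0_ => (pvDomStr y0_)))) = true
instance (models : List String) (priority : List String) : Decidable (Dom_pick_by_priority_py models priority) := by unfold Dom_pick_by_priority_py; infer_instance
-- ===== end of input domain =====

-- B replaces A's tag-major scan (one pass over the items per priority tag) by a single
-- item-major pass that ranks each item once and keeps the running best; objective: alternative decomposition.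

-- ===== PORT A =====
-- the 'for tag in priority' loop: first item containing tag, return it if truthy, else next tag
def pvALoop (items : List String) : List String → Option String
  | [] => none
  | tag :: rest =>
    match items.find? (fun m => PySem.Str.isIn tag (PySem.Str.lower m)) with
    | some m => if m ≠ "" then some m else pvALoop items rest
    | none => pvALoop items rest

def pick_by_priority_py (models : List String) (priority : List String) : Option String :=
  let items := models.filter (fun item => item != "")
  if items = [] then none
  else
    match pvALoop items priority with
    | some m => some m
    | none => PySem.List.pyGet? items 0

-- ===== PORT B =====
-- rank of a (lowercased) item: index of the first tag that is a substring, len(priority) if none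
def pvRank (priority : List String) (low : String) : Nat :=
  match priority with
  | [] => 0
  | tag :: rest => if PySem.Str.isIn tag low then 0 else pvRank rest low + 1

-- the single pass: best = None / (rank, item), updated on strictly smaller rank
def pvBLoop (priority : List String) (best : Option (Nat × String)) : List String → Option (Nat × String)
  | [] => best
  | item :: rest =>
    if item = "" then pvBLoop priority best rest
    else
      let r := pvRank priority (PySem.Str.lower item)
      match best with
      | none => pvBLoop priority (some (r, item)) rest
      | some (br, bi) =>
        if r < br then pvBLoop priority (some (r, item)) rest
        else pvBLoop priority (some (br, bi)) rest

def pick_by_priority_py_alt (models : List String) (priority : List String) : Option String :=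
  (pvBLoop priority none models).map Prod.snd

-- ===== PRECONDITION & SPEC =====
def Spec_pick_by_priority_py (models : List String) (priority : List String) (out : Option String) : Prop := out = pick_by_priority_py_alt models priority
instance (models : List String) (priority : List String) (out : Option String) : Decidable (Spec_pick_by_priority_py models priority out) := by unfold Spec_pick_by_priority_py; infer_instance

-- ===== CLAIM (what is proved, stated in full; the proofs are below) =====
def Claim_equal_pick_by_priority_py : Prop := ∀ (models : List String) (priority : List String), Dom_pick_by_priority_py models priority → Spec_pick_by_priority_py models priority (pick_by_priority_py models priority)

-- ===== LEMMAS AND PROOFS =====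

-- B's loop ignores empty items, so it may be run on the filtered list
theorem pvBLoop_filter (p : List String) (acc : Option (Nat × String)) (xs : List String) :
    pvBLoop p acc xs = pvBLoop p acc (xs.filter (fun item => item != "")) := by
  induction xs generalizing acc with
  | nil => rfl
  | cons x rest ih =>
    by_cases hx : x = ""
    · rw [List.filter_cons_of_neg (by simp [hx])]
      simp only [pvBLoop, if_pos hx]
      exact ih acc
    · rw [List.filter_cons_of_pos (by simp [hx])]
      cases acc with
      | none => simp only [pvBLoop, if_neg hx]; exact ih _
      | some a =>
        obtain ⟨br, bi⟩ := a
        simp only [pvBLoop, if_neg hx]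
        split <;> exact ih _

theorem pvRank_le (p : List String) (low : String) : pvRank p low ≤ p.length := by
  induction p with
  | nil => simp [pvRank]
  | cons t ts ih => simp only [pvRank]; split <;> simp [Nat.succ_le_succ ih]

-- once the best has rank 0 it never changes
theorem pvBLoop_zero (p : List String) (m : String) (xs : List String) :
    pvBLoop p (some (0, m)) xs = some (0, m) := by
  induction xs with
  | nil => rfl
  | cons x rest ih => by_cases hx : x = "" <;> simp [pvBLoop, hx, ih]

-- a some accumulator never becomes none
theorem pvBLoop_isSome (p : List String) (a : Nat × String) (xs : List String) :
    (pvBLoop p (some a) xs).isSome := by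
  induction xs generalizing a with
  | nil => rfl
  | cons x rest ih =>
    obtain ⟨br, bi⟩ := a
    by_cases hx : x = ""
    · simp only [pvBLoop, if_pos hx]; exact ih _
    · simp only [pvBLoop, if_neg hx]; split <;> exact ih _

-- if the first item containing tag t is m0, the pass over (t :: ts) ends at (0, m0)
theorem pvBLoop_find (t : String) (ts : List String) (xs : List String) (m0 : String)
    (hne : ∀ x ∈ xs, x ≠ "")
    (acc : Option (Nat × String)) (hacc : ∀ a ∈ acc, 0 < a.1)
    (hf : xs.find? (fun m => PySem.Str.isIn t (PySem.Str.lower m)) = some m0) :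
    pvBLoop (t :: ts) acc xs = some (0, m0) := by
  induction xs generalizing acc with
  | nil => simp at hf
  | cons x rest ih =>
    have hx : x ≠ "" := hne x (List.mem_cons_self ..)
    have hne' : ∀ y ∈ rest, y ≠ "" := fun y hy => hne y (List.mem_cons_of_mem _ hy)
    by_cases hin : PySem.Str.isIn t (PySem.Str.lower x) = true
    · have hm0 : m0 = x := by
        simp only [List.find?_cons, hin] at hf; exact (Option.some_inj.mp hf).symm
      subst hm0
      have hin' := by simpa using hin
      have hr0 : pvRank (t :: ts) (PySem.Str.lower m0) = 0 := by simp [pvRank, hin']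
      cases acc with
      | none => simp only [pvBLoop, if_neg hx, hr0]; exact pvBLoop_zero _ _ _
      | some a =>
        obtain ⟨br, bi⟩ := a
        have hbr : 0 < br := hacc _ rfl
        simp only [pvBLoop, if_neg hx, hr0, if_pos hbr]
        exact pvBLoop_zero _ _ _
    · have hinf : PySem.Str.isIn t (PySem.Str.lower x) = false := by simpa using hin
      simp only [List.find?_cons, hinf] at hf
      have hin' := by simpa using hinf
      have hr1 : pvRank (t :: ts) (PySem.Str.lower x) = pvRank ts (PySem.Str.lower x) + 1 := by
        simp [pvRank, hin']
      cases acc with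
      | none =>
        simp only [pvBLoop, if_neg hx, hr1]
        exact ih hne' _ (by intro a ha; rw [Option.mem_def, Option.some_inj] at ha; subst ha; exact Nat.succ_pos _) hf
      | some a =>
        obtain ⟨br, bi⟩ := a
        have hbr : 0 < br := hacc _ rfl
        simp only [pvBLoop, if_neg hx, hr1]
        split
        · exact ih hne' _ (by intro a ha; rw [Option.mem_def, Option.some_inj] at ha; subst ha; exact Nat.succ_pos _) hf
        · exact ih hne' _ (by intro a ha; rw [Option.mem_def, Option.some_inj] at ha; subst ha; exact hbr) hf

-- if no item contains tag t, the pass over (t :: ts) is the pass over ts with all ranks shifted by one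
theorem pvBLoop_shift (t : String) (ts : List String) (xs : List String)
    (hno : ∀ x ∈ xs, PySem.Str.isIn t (PySem.Str.lower x) = false)
    (acc : Option (Nat × String)) :
    pvBLoop (t :: ts) (acc.map (fun a => (a.1 + 1, a.2))) xs
      = (pvBLoop ts acc xs).map (fun a => (a.1 + 1, a.2)) := by
  induction xs generalizing acc with
  | nil => rfl
  | cons x rest ih =>
    have hrest : ∀ y ∈ rest, PySem.Str.isIn t (PySem.Str.lower y) = false :=
      fun y hy => hno y (List.mem_cons_of_mem _ hy)
    by_cases hx : x = ""
    · simp only [pvBLoop, if_pos hx]; exact ih hrest _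
    · have hnx := hno x (List.mem_cons_self ..)
      have hin' := by simpa using hnx
      have hr1 : pvRank (t :: ts) (PySem.Str.lower x) = pvRank ts (PySem.Str.lower x) + 1 := by
        simp [pvRank, hin']
      cases acc with
      | none =>
        simp only [Option.map_none, pvBLoop, if_neg hx, hr1]
        exact ih hrest (some (pvRank ts (PySem.Str.lower x), x))
      | some a =>
        obtain ⟨br, bi⟩ := a
        simp only [Option.map_some, pvBLoop, if_neg hx, hr1]
        by_cases hlt : pvRank ts (PySem.Str.lower x) < br
        · rw [if_pos (by omega), if_pos hlt]
          exact ih hrest (some (pvRank ts (PySem.Str.lower x), x))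
        · rw [if_neg (by omega), if_neg hlt]
          exact ih hrest (some (br, bi))

-- A's tag loop in terms of B's single pass
theorem pvALoop_eq (ps : List String) (xs : List String) (hne : ∀ x ∈ xs, x ≠ "") :
    pvALoop xs ps = match pvBLoop ps none xs with
      | some (r, m) => if r < ps.length then some m else none
      | none => none := by
  induction ps generalizing xs with
  | nil =>
    cases h : pvBLoop [] none xs with
    | none => rfl
    | some a => obtain ⟨r, m⟩ := a; simp [pvALoop]
  | cons t ts ih =>
    cases hf : xs.find? (fun m => PySem.Str.isIn t (PySem.Str.lower m)) with
    | some m0 =>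
      have hm0 : m0 ≠ "" := hne m0 (List.mem_of_find?_eq_some hf)
      rw [pvALoop, hf]
      rw [pvBLoop_find t ts xs m0 hne none (by intro a ha; simp at ha) hf]
      simp [hm0]
    | none =>
      have hno : ∀ x ∈ xs, PySem.Str.isIn t (PySem.Str.lower x) = false := by
        intro x hx
        have := List.find?_eq_none.mp hf x hx
        simpa using this
      rw [pvALoop, hf, ih xs hne]
      have hsh := pvBLoop_shift t ts xs hno none
      simp only [Option.map_none] at hsh
      rw [hsh]
      cases pvBLoop ts none xs with
      | none => rfl
      | some a =>
        obtain ⟨r, m⟩ := a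
        simp only [Option.map_some]
        by_cases hlt : r < ts.length
        · rw [if_pos hlt, if_pos (by simp; omega)]
        · rw [if_neg hlt, if_neg (by simp; omega)]

-- if the final best rank is ≥ len(priority), the best never moved off the accumulator
theorem pvBLoop_stuck (p : List String) (xs : List String) (a : Nat × String)
    (ha : a.1 ≤ p.length) (r : Nat) (m : String)
    (h : pvBLoop p (some a) xs = some (r, m)) (hr : p.length ≤ r) : a = (r, m) := by
  induction xs generalizing a with
  | nil => simpa [pvBLoop] using h
  | cons x rest ih =>
    by_cases hx : x = ""
    · exact ih a ha (by simpa [pvBLoop, hx] using h)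
    · obtain ⟨br, bi⟩ := a
      simp only [pvBLoop, if_neg hx] at h
      by_cases hlt : pvRank p (PySem.Str.lower x) < br
      · rw [if_pos hlt] at h
        have h2 := ih _ (pvRank_le p (PySem.Str.lower x)) h
        have h3 : pvRank p (PySem.Str.lower x) = r := congrArg Prod.fst h2
        have h4 := pvRank_le p (PySem.Str.lower x)
        simp only at ha
        omega
      · rw [if_neg hlt] at h
        exact ih _ ha h

-- ===== VERDICT (by name: the statement is the Claim_ definition above) =====
theorem pick_by_priority_py_spec : Claim_equal_pick_by_priority_py := by
  intro models priority _
  unfold Spec_pick_by_priority_py pick_by_priority_py pick_by_priority_py_alt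
  rw [pvBLoop_filter]
  set xs := models.filter (fun item => item != "") with hxs
  have hne : ∀ x ∈ xs, x ≠ "" := by
    intro x hx
    have := (List.mem_filter.mp (hxs ▸ hx)).2
    simpa using this
  by_cases hnil : xs = []
  · simp [hnil, pvBLoop]
  · rw [if_neg hnil, pvALoop_eq priority xs hne]
    obtain ⟨x, rest, hxe⟩ := List.exists_cons_of_ne_nil hnil
    have hx : x ≠ "" := hne x (hxe ▸ List.mem_cons_self ..)
    have hstep : pvBLoop priority none xs
        = pvBLoop priority (some (pvRank priority (PySem.Str.lower x), x)) rest := by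
      rw [hxe]; simp [pvBLoop, hx]
    cases h : pvBLoop priority none xs with
    | none =>
      rw [hstep] at h
      have := pvBLoop_isSome priority (pvRank priority (PySem.Str.lower x), x) rest
      simp [h] at this
    | some a =>
      obtain ⟨r, m⟩ := a
      by_cases hr : r < priority.length
      · simp [hr]
      · have hstuck : (pvRank priority (PySem.Str.lower x), x) = (r, m) :=
          pvBLoop_stuck priority rest _ (pvRank_le _ _) r m (hstep ▸ h) (by omega)
        have hm : m = x := (congrArg Prod.snd hstuck).symm
        simp [hr, hm, hxe, PySem.List.pyGet?, PySem.List.pyIdx?]
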